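-- pv_equiv track=rewrite | github.com/pypi-data/pypi-mirror-369 | packages/fuglu/fuglu-1.6.0.tar.gz/fuglu-1.6.0/src/fuglu/shared.py | getlist_space_comma_separated
-- ===== SOURCE A (Python) =====
-- import typing as tp
--
-- def getlist_space_comma_separated(inputstring:str) -> tp.List[str]:
--     """Create list from string, splitting at ',' space"""
--     BACKSLASH = '{BACKSLASH}'
--     SPACE = '{SPACE}'
--     COMMA = '{COMMA}'
--     finallist = []
--     if inputstring:
--         inputstring = inputstring.strip()
--         # encode escaped spaces/commas to distinguish them from delimiters
--         inputstring = inputstring.replace('\\\\', BACKSLASH).replace('\\ ', SPACE).replace('\\,', COMMA)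
--         if inputstring:
--             # check for comma-separated list
--             commaseplist = [tag.strip() for tag in inputstring.split(',') if tag.strip()]
--             # also handle space-separated list
--             for tag in commaseplist:
--                 # take elements, split by spac
--                 finallist.extend([t.strip() for t in tag.split(' ') if t.strip()])
--         rawlist = finallist
--         finallist = []
--         # decode encoded spaces/commas
--         for entry in rawlist:
--             finallist.append(entry.replace(SPACE, ' ').replace(COMMA, ',').replace(BACKSLASH, '\\'))
--
--     return finallist
-- ===== SOURCE B (Python) =====
-- def _flush(cur):
--     # trim unescaped whitespace from both ends of the pending token
--     while cur and not cur[0][1] and cur[0][0].isspace():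
--         cur = cur[1:]
--     while cur and not cur[-1][1] and cur[-1][0].isspace():
--         cur = cur[:-1]
--     if not cur:
--         return []
--     return [''.join(c for c, _ in cur)]
--
--
-- def getlist_space_comma_separated(inputstring):
--     """Create list from string, splitting at ',' space (single escape-aware scan)"""
--     if not inputstring:
--         return []
--     s = inputstring.strip()
--     out = []
--     cur = []  # pending token: list of (char, escaped?)
--     i = 0
--     n = len(s)
--     while i < n:
--         c = s[i]
--         if c == '\\' and i + 1 < n and s[i + 1] in '\\ ,':
--             cur.append((s[i + 1], True))
--             i += 2
--         elif c == ' ' or c == ',':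
--             out.extend(_flush(cur))
--             cur = []
--             i += 1
--         else:
--             cur.append((c, False))
--             i += 1
--     out.extend(_flush(cur))
--     return out
-- ===== Notes on version B (the rewrite author's own statement) =====
-- stated objective: alternative
-- what changed: Replaces A's three-replace placeholder encode, nested comma-then-space splits and per-token three-replace decode with a single left-to-right escape-aware scan that resolves \\, \space and \, inline while building tokens with an accumulator (no placeholder strings, no replace/split calls).
-- intended difference: On inputs containing a literal placeholder substring {BACKSLASH}, {SPACE} or {COMMA}, A's decode pass collapses that text into '\', ' ' or ',' (e.g. A('{COMMA}') = [',']), while B returns the text unchanged (['{COMMA}']), which is the intended behaviour since the placeholders are a private encoding detail that should not leak. — e.g. on getlist_space_comma_separated("{COMMA}"): A returns [","], B returns ["{COMMA}"]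
import Mathlib
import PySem

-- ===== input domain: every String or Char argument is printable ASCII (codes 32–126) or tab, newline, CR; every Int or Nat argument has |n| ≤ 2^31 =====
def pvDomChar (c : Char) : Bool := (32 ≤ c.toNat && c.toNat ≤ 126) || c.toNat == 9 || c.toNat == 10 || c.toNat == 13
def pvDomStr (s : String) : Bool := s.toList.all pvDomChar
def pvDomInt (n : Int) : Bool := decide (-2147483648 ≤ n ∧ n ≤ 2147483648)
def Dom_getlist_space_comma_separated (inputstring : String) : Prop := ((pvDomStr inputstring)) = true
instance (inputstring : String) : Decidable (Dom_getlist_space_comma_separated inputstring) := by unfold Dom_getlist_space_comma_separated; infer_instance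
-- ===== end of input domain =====

set_option maxRecDepth 10000


-- B replaces A's placeholder encode / nested comma-then-space split / decode pipeline with a
-- single escape-aware scan building tokens in one pass (objective: alternative, same cost).

-- ===== PORT A =====
-- the three-replace encode and per-token three-replace decode, literally A's chains
def pvEncode (s : List Char) : List Char :=
  PySem.Chars.replace
    (PySem.Chars.replace
      (PySem.Chars.replace s ['\\', '\\'] "{BACKSLASH}".toList)
      ['\\', ' '] "{SPACE}".toList)
    ['\\', ','] "{COMMA}".toList

def pvDecode (e : List Char) : List Char :=
  PySem.Chars.replace
    (PySem.Chars.replace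
      (PySem.Chars.replace e "{SPACE}".toList [' '])
      "{COMMA}".toList [','])
    "{BACKSLASH}".toList ['\\']

def getlist_space_comma_separated (inputstring : String) : List String :=
  if inputstring = "" then []
  else
    let s := pvEncode (PySem.Chars.strip inputstring.toList)
    let finallist : List (List Char) :=
      if s ≠ [] then
        let commaseplist := ((PySem.Chars.splitOn s [',']).map PySem.Chars.strip).filter (fun t => t ≠ [])
        commaseplist.foldl
          (fun acc tag =>
            acc ++ (((PySem.Chars.splitOn tag [' ']).map PySem.Chars.strip).filter (fun t => t ≠ []))) []
      else []
    finallist.map (fun e => String.ofList (pvDecode e))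

-- ===== PORT B =====
-- pending-token element: (character, was it escaped?)
def pvIsSp (x : Char × Bool) : Bool := !x.2 && PySem.Chars.isspace x.1

-- _flush: trim unescaped whitespace from both ends (the two while loops), emit token if nonempty
def pvFlush (cur : List (Char × Bool)) : List String :=
  let c1 := cur.dropWhile pvIsSp
  let c2 := (c1.reverse.dropWhile pvIsSp).reverse
  if c2 = [] then [] else [String.ofList (c2.map Prod.fst)]

-- the while loop over s with index i and accumulators cur/out
def pvScan : List Char → List (Char × Bool) → List String → List String
  | '\\' :: d :: rest, cur, out =>
      if d = '\\' ∨ d = ' ' ∨ d = ',' then pvScan rest (cur ++ [(d, true)]) out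
      else pvScan (d :: rest) (cur ++ [('\\', false)]) out
  | c :: rest, cur, out =>
      if c = ' ' ∨ c = ',' then pvScan rest [] (out ++ pvFlush cur)
      else pvScan rest (cur ++ [(c, false)]) out
  | [], cur, out => out ++ pvFlush cur

def getlist_space_comma_separated_alt (inputstring : String) : List String :=
  if inputstring = "" then []
  else pvScan (PySem.Chars.strip inputstring.toList) [] []

-- ===== PRECONDITION & SPEC =====
-- On inputs containing a literal placeholder substring {BACKSLASH}, {SPACE} or {COMMA}, A's decode
-- pass collapses that text into '\', ' ' or ',' (e.g. A "{COMMA}" = [","]); B returns the text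
-- unchanged (["{COMMA}"]), the intended behaviour: the placeholders are A's private encoding detail.
def D_getlist_space_comma_separated (inputstring : String) : Prop :=
  PySem.Chars.isIn "{BACKSLASH}".toList inputstring.toList = true ∨
  PySem.Chars.isIn "{SPACE}".toList inputstring.toList = true ∨
  PySem.Chars.isIn "{COMMA}".toList inputstring.toList = true
instance (inputstring : String) : Decidable (D_getlist_space_comma_separated inputstring) := by
  unfold D_getlist_space_comma_separated; infer_instance

def Spec_getlist_space_comma_separated (inputstring : String) (out : List String) : Prop :=
  ¬ D_getlist_space_comma_separated inputstring → out = getlist_space_comma_separated_alt inputstring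
instance (inputstring : String) (out : List String) : Decidable (Spec_getlist_space_comma_separated inputstring out) := by
  unfold Spec_getlist_space_comma_separated; infer_instance

def pvDiffWitness_getlist_space_comma_separated : String := "{COMMA}"
def pvDiffWitnessOut_getlist_space_comma_separated : (List String) × (List String) := ([","], ["{COMMA}"])

-- ===== CLAIM (what is proved, stated in full; the proofs are below) =====
def Claim_unchanged_getlist_space_comma_separated : Prop := ∀ (inputstring : String), Dom_getlist_space_comma_separated inputstring → Spec_getlist_space_comma_separated inputstring (getlist_space_comma_separated inputstring)
def Claim_changed_getlist_space_comma_separated : Prop := Dom_getlist_space_comma_separated (pvDiffWitness_getlist_space_comma_separated) ∧ D_getlist_space_comma_separated (pvDiffWitness_getlist_space_comma_separated) ∧ getlist_space_comma_separated (pvDiffWitness_getlist_space_comma_separated) = pvDiffWitnessOut_getlist_space_comma_separated.1 ∧ getlist_space_comma_separated_alt (pvDiffWitness_getlist_space_comma_separated) = pvDiffWitnessOut_getlist_space_comma_separated.2 ∧ pvDiffWitnessOut_getlist_space_comma_separated.1 ≠ pvDiffWitnessOut_getlist_space_comma_separated.2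

-- ===== LEMMAS AND PROOFS =====
-- generic model of PySem.Chars.replace (leftmost, non-overlapping)
def replM (p rep : List Char) : List Char → List Char
  | [] => []
  | c :: r =>
    if p.isPrefixOf (c :: r) then rep ++ replM p rep (r.drop (p.length - 1))
    else c :: replM p rep r
  termination_by l => l.length
  decreasing_by
  all_goals simp

theorem replM_nil (p rep : List Char) : replM p rep [] = [] := by
  rw [replM.eq_def]

theorem replM_cons (p rep : List Char) (c : Char) (r : List Char) :
    replM p rep (c :: r) =
      if p.isPrefixOf (c :: r) then rep ++ replM p rep (r.drop (p.length - 1))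
      else c :: replM p rep r := by
  rw [replM.eq_def]

theorem replM_go (p rep : List Char) (hp : p ≠ []) :
    ∀ (fuel : Nat) (l : List Char) (acc : List Char), l.length ≤ fuel →
      PySem.Chars.replace.go p rep fuel l acc = acc.reverse ++ replM p rep l := by
  intro fuel
  induction fuel with
  | zero =>
    intro l acc h
    have : l = [] := by cases l <;> simp_all
    subst this
    simp [PySem.Chars.replace.go, replM_nil]
  | succ f ih =>
    intro l acc h
    cases l with
    | nil => simp [PySem.Chars.replace.go, replM_nil]
    | cons c r =>
      by_cases hpre : p.isPrefixOf (c :: r)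
      · have hlen : 1 ≤ p.length := by cases p <;> simp_all
        rw [show PySem.Chars.replace.go p rep (f+1) (c :: r) acc
            = PySem.Chars.replace.go p rep f ((c :: r).drop p.length) (rep.reverse ++ acc) by
          simp [PySem.Chars.replace.go, hpre]]
        rw [ih _ _ (by simp at h ⊢; omega)]
        rw [show replM p rep (c :: r) = rep ++ replM p rep (r.drop (p.length - 1)) by
          rw [replM_cons]; simp [hpre]]
        have : (c :: r).drop p.length = r.drop (p.length - 1) := by
          cases hq : p.length with
          | zero => omega
          | succ k => simp
        rw [this]; simp
      · rw [show PySem.Chars.replace.go p rep (f+1) (c :: r) acc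
            = PySem.Chars.replace.go p rep f r (c :: acc) by
          simp [PySem.Chars.replace.go, hpre]]
        rw [ih _ _ (by simp at h ⊢; omega)]
        rw [show replM p rep (c :: r) = c :: replM p rep r by rw [replM_cons]; simp [hpre]]
        simp

theorem replace_eq_replM (l p rep : List Char) (hp : p ≠ []) :
    PySem.Chars.replace l p rep = replM p rep l := by
  rw [show PySem.Chars.replace l p rep = PySem.Chars.replace.go p rep l.length l [] by
    simp [PySem.Chars.replace, hp]]
  rw [replM_go p rep hp l.length l [] le_rfl]
  simp

theorem replM_match (p rep v : List Char) (hp : p ≠ []) :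
    replM p rep (p ++ v) = rep ++ replM p rep v := by
  cases p with
  | nil => exact absurd rfl hp
  | cons a p' =>
    rw [show (a :: p') ++ v = a :: (p' ++ v) from rfl, replM_cons]
    rw [if_pos (by rw [List.isPrefixOf_iff_prefix]; exact ⟨v, rfl⟩)]
    simp

theorem replM_pass (p rep : List Char) (c : Char) (v : List Char)
    (h : ¬ p <+: (c :: v)) : replM p rep (c :: v) = c :: replM p rep v := by
  rw [replM_cons, if_neg (by rw [List.isPrefixOf_iff_prefix]; exact h)]

theorem replM_lit (p rep : List Char) (a : Char) (hp : p.head? = some a)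
    (u v : List Char) (hu : ∀ x ∈ u, x ≠ a) :
    replM p rep (u ++ v) = u ++ replM p rep v := by
  induction u with
  | nil => simp
  | cons x u' ih =>
    rw [List.cons_append, replM_pass]
    · rw [ih (fun y hy => hu y (by simp [hy]))]; rfl
    · intro hpre
      cases p with
      | nil => simp at hp
      | cons b p' =>
        simp at hp
        rcases List.cons_prefix_cons.mp hpre with ⟨hb, -⟩
        exact hu x (by simp) (by rw [← hb, hp])

def ph (c : Char) : List Char :=
  if c = '\\' then "{BACKSLASH}".toList
  else if c = ' ' then "{SPACE}".toList
  else if c = ',' then "{COMMA}".toList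
  else [c]

def enc2 : List Char → List Char
  | [] => []
  | c :: r =>
    if c = '\\' then
      match r with
      | d :: r' =>
        if d = '\\' then "{BACKSLASH}".toList ++ enc2 r'
        else if d = ' ' then "{SPACE}".toList ++ enc2 r'
        else if d = ',' then "{COMMA}".toList ++ enc2 r'
        else c :: enc2 (d :: r')
      | [] => [c]
    else c :: enc2 r

theorem not_prefix_fst (a c : Char) (p v : List Char) (h : a ≠ c) : ¬ (a :: p) <+: (c :: v) := by
  intro hp
  exact h (List.cons_prefix_cons.mp hp).1

theorem not_prefix2_snd (a b c d : Char) (v : List Char) (h : b ≠ d) : ¬ [a, b] <+: (c :: d :: v) := by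
  intro hp
  exact h ((List.cons_prefix_cons.mp (List.cons_prefix_cons.mp hp).2).1)

theorem noBS_BL : ∀ x ∈ "{BACKSLASH}".toList, x ≠ '\\' := by
  intro x hx; simp at hx
  rcases hx with rfl|rfl|rfl|rfl|rfl|rfl|rfl|rfl|rfl|rfl|rfl <;> decide

theorem noBS_SP : ∀ x ∈ "{SPACE}".toList, x ≠ '\\' := by
  intro x hx; simp at hx
  rcases hx with rfl|rfl|rfl|rfl|rfl|rfl|rfl <;> decide

theorem enc_eq (cs : List Char) : pvEncode cs = enc2 cs := by
  unfold pvEncode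
  rw [replace_eq_replM _ _ _ (by simp), replace_eq_replM _ _ _ (by simp),
      replace_eq_replM _ _ _ (by simp)]
  induction cs using enc2.induct with
  | case1 => simp [replM_nil, enc2]
  | case2 r' ih =>
    have e1 : replM ['\\','\\'] "{BACKSLASH}".toList ('\\' :: '\\' :: r')
        = "{BACKSLASH}".toList ++ replM ['\\','\\'] "{BACKSLASH}".toList r' :=
      replM_match _ _ _ (by simp)
    rw [e1, replM_lit _ _ '\\' rfl _ _ noBS_BL, replM_lit _ _ '\\' rfl _ _ noBS_BL, ih]
    simp [enc2]
  | case3 r' h ih =>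
    have e1a : replM ['\\','\\'] "{BACKSLASH}".toList (' ' :: r')
        = ' ' :: replM ['\\','\\'] "{BACKSLASH}".toList r' :=
      replM_pass _ _ _ _ (not_prefix_fst _ _ _ _ (by decide))
    have e1 : replM ['\\','\\'] "{BACKSLASH}".toList ('\\' :: ' ' :: r')
        = '\\' :: ' ' :: replM ['\\','\\'] "{BACKSLASH}".toList r' := by
      rw [replM_pass _ _ _ _ (not_prefix2_snd _ _ _ _ _ (by decide)), e1a]
    have e2 : replM ['\\',' '] "{SPACE}".toList ('\\' :: ' ' :: replM ['\\','\\'] "{BACKSLASH}".toList r')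
        = "{SPACE}".toList ++ replM ['\\',' '] "{SPACE}".toList (replM ['\\','\\'] "{BACKSLASH}".toList r') :=
      replM_match _ _ _ (by simp)
    rw [e1, e2, replM_lit _ _ '\\' rfl _ _ noBS_SP, ih]
    simp [enc2]
  | case4 r' h h' ih =>
    have e1a : replM ['\\','\\'] "{BACKSLASH}".toList (',' :: r')
        = ',' :: replM ['\\','\\'] "{BACKSLASH}".toList r' :=
      replM_pass _ _ _ _ (not_prefix_fst _ _ _ _ (by decide))
    have e1 : replM ['\\','\\'] "{BACKSLASH}".toList ('\\' :: ',' :: r')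
        = '\\' :: ',' :: replM ['\\','\\'] "{BACKSLASH}".toList r' := by
      rw [replM_pass _ _ _ _ (not_prefix2_snd _ _ _ _ _ (by decide)), e1a]
    have e2a : replM ['\\',' '] "{SPACE}".toList (',' :: replM ['\\','\\'] "{BACKSLASH}".toList r')
        = ',' :: replM ['\\',' '] "{SPACE}".toList (replM ['\\','\\'] "{BACKSLASH}".toList r') :=
      replM_pass _ _ _ _ (not_prefix_fst _ _ _ _ (by decide))
    have e2 : replM ['\\',' '] "{SPACE}".toList ('\\' :: ',' :: replM ['\\','\\'] "{BACKSLASH}".toList r')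
        = '\\' :: ',' :: replM ['\\',' '] "{SPACE}".toList (replM ['\\','\\'] "{BACKSLASH}".toList r') := by
      rw [replM_pass _ _ _ _ (not_prefix2_snd _ _ _ _ _ (by decide)), e2a]
    have e3 : replM ['\\',','] "{COMMA}".toList ('\\' :: ',' :: replM ['\\',' '] "{SPACE}".toList (replM ['\\','\\'] "{BACKSLASH}".toList r'))
        = "{COMMA}".toList ++ replM ['\\',','] "{COMMA}".toList (replM ['\\',' '] "{SPACE}".toList (replM ['\\','\\'] "{BACKSLASH}".toList r')) :=
      replM_match _ _ _ (by simp)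
    rw [e1, e2, e3, ih]
    simp [enc2]
  | case5 d r' h1 h2 h3 ih =>
    have hd : d ≠ '\\' := h1
    have e1a : replM ['\\','\\'] "{BACKSLASH}".toList (d :: r')
        = d :: replM ['\\','\\'] "{BACKSLASH}".toList r' :=
      replM_pass _ _ _ _ (not_prefix_fst _ _ _ _ (fun hh => hd hh.symm))
    have e1 : replM ['\\','\\'] "{BACKSLASH}".toList ('\\' :: d :: r')
        = '\\' :: d :: replM ['\\','\\'] "{BACKSLASH}".toList r' := by
      rw [replM_pass _ _ _ _ (not_prefix2_snd _ _ _ _ _ (Ne.symm h1)), e1a]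
    have e2a : replM ['\\',' '] "{SPACE}".toList (d :: replM ['\\','\\'] "{BACKSLASH}".toList r')
        = d :: replM ['\\',' '] "{SPACE}".toList (replM ['\\','\\'] "{BACKSLASH}".toList r') :=
      replM_pass _ _ _ _ (not_prefix_fst _ _ _ _ (fun hh => hd hh.symm))
    have e2 : replM ['\\',' '] "{SPACE}".toList ('\\' :: d :: replM ['\\','\\'] "{BACKSLASH}".toList r')
        = '\\' :: d :: replM ['\\',' '] "{SPACE}".toList (replM ['\\','\\'] "{BACKSLASH}".toList r') := by
      rw [replM_pass _ _ _ _ (not_prefix2_snd _ _ _ _ _ (Ne.symm h2)), e2a]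
    have e3a : replM ['\\',','] "{COMMA}".toList (d :: replM ['\\',' '] "{SPACE}".toList (replM ['\\','\\'] "{BACKSLASH}".toList r'))
        = d :: replM ['\\',','] "{COMMA}".toList (replM ['\\',' '] "{SPACE}".toList (replM ['\\','\\'] "{BACKSLASH}".toList r')) :=
      replM_pass _ _ _ _ (not_prefix_fst _ _ _ _ (fun hh => hd hh.symm))
    have e3 : replM ['\\',','] "{COMMA}".toList ('\\' :: d :: replM ['\\',' '] "{SPACE}".toList (replM ['\\','\\'] "{BACKSLASH}".toList r'))
        = '\\' :: d :: replM ['\\',','] "{COMMA}".toList (replM ['\\',' '] "{SPACE}".toList (replM ['\\','\\'] "{BACKSLASH}".toList r')) := by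
      rw [replM_pass _ _ _ _ (not_prefix2_snd _ _ _ _ _ (Ne.symm h3)), e3a]
    rw [e1a, e2a, e3a] at ih
    rw [e1, e2, e3, ih]
    simp [enc2, h1, h2, h3]
  | case6 =>
    simp [replM_nil, replM_cons, List.isPrefixOf, enc2]
  | case7 c r h1 ih =>
    have hc : c ≠ '\\' := fun hh => h1 hh
    have e1 : replM ['\\','\\'] "{BACKSLASH}".toList (c :: r)
        = c :: replM ['\\','\\'] "{BACKSLASH}".toList r :=
      replM_pass _ _ _ _ (not_prefix_fst _ _ _ _ (Ne.symm hc))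
    have e2 : replM ['\\',' '] "{SPACE}".toList (c :: replM ['\\','\\'] "{BACKSLASH}".toList r)
        = c :: replM ['\\',' '] "{SPACE}".toList (replM ['\\','\\'] "{BACKSLASH}".toList r) :=
      replM_pass _ _ _ _ (not_prefix_fst _ _ _ _ (Ne.symm hc))
    have e3 : replM ['\\',','] "{COMMA}".toList (c :: replM ['\\',' '] "{SPACE}".toList (replM ['\\','\\'] "{BACKSLASH}".toList r))
        = c :: replM ['\\',','] "{COMMA}".toList (replM ['\\',' '] "{SPACE}".toList (replM ['\\','\\'] "{BACKSLASH}".toList r)) :=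
      replM_pass _ _ _ _ (not_prefix_fst _ _ _ _ (Ne.symm hc))
    rw [e1, e2, e3, ih]
    conv_rhs => rw [enc2.eq_def]
    simp [hc]

def BLs : List Char := ['{','B','A','C','K','S','L','A','S','H','}']
def SPs : List Char := ['{','S','P','A','C','E','}']
def CMs : List Char := ['{','C','O','M','M','A','}']

theorem BL_eq : "{BACKSLASH}".toList = BLs := rfl
theorem SP_eq : "{SPACE}".toList = SPs := rfl
theorem CM_eq : "{COMMA}".toList = CMs := rfl

def f1 (x : Char × Bool) : List Char := if x.2 then ph x.1 else [x.1]
def f2 (x : Char × Bool) : List Char := if x.2 then (if x.1 = ' ' then [' '] else ph x.1) else [x.1]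
def f3 (x : Char × Bool) : List Char := if x.2 then (if x.1 = '\\' then ph x.1 else [x.1]) else [x.1]

def ren1 (cur : List (Char × Bool)) : List Char := cur.flatMap f1
def ren2 (cur : List (Char × Bool)) : List Char := cur.flatMap f2
def ren3 (cur : List (Char × Bool)) : List Char := cur.flatMap f3

def GoodTok (cur : List (Char × Bool)) : Prop :=
  ∀ x ∈ cur, (x.2 = true → (x.1 = '\\' ∨ x.1 = ' ' ∨ x.1 = ',')) ∧
             (x.2 = false → x.1 ≠ ' ' ∧ x.1 ≠ ',')

def FFTok (cur : List (Char × Bool)) : Prop :=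
  ¬ (BLs.map (fun c => (c, false))) <:+: cur ∧
  ¬ (SPs.map (fun c => (c, false))) <:+: cur ∧
  ¬ (CMs.map (fun c => (c, false))) <:+: cur

theorem infix_of_infix_tail {α : Type} {l t : List α} {a : α} (h : l <:+: t) : l <:+: a :: t := by
  rcases h with ⟨s, u, rfl⟩
  exact ⟨a :: s, u, rfl⟩

theorem GoodTok_tail {x : Char × Bool} {rest : List (Char × Bool)} (h : GoodTok (x :: rest)) :
    GoodTok rest := fun y hy => h y (by simp [hy])

theorem not_prefix2_snd' (a x b y : Char) (p' w : List Char) (h : x ≠ y) :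
    ¬ (a :: x :: p') <+: (b :: y :: w) := by
  intro hp
  exact h ((List.cons_prefix_cons.mp (List.cons_prefix_cons.mp hp).2).1)

theorem lit_prefix_gen (f : Char × Bool → List Char) (xs : List Char)
    (hA : ∀ c, f (c, false) = [c])
    (hne : ∀ c, (c = '\\' ∨ c = ' ' ∨ c = ',') → f (c, true) ≠ [])
    (hB : ∀ c, (c = '\\' ∨ c = ' ' ∨ c = ',') → ∀ x ∈ xs, (f (c, true)).head? ≠ some x) :
    ∀ rest, GoodTok rest → xs <+: rest.flatMap f →
      (xs.map (fun c => (c, false))) <+: rest := by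
  induction xs with
  | nil => intro rest _ _; simp
  | cons x xs' ih =>
    intro rest hg hpre
    cases rest with
    | nil => simp at hpre
    | cons y rest' =>
      obtain ⟨c, b⟩ := y
      cases b with
      | true =>
        have hspec := (hg (c, true) (by simp)).1 rfl
        exfalso
        rcases hpre with ⟨t, ht⟩
        rw [List.flatMap_cons] at ht
        cases hfe : f (c, true) with
        | nil => exact hne c hspec hfe
        | cons h0 f' =>
          rw [hfe] at ht
          have : h0 = x := by
            have := congrArg List.head? ht
            simp at this
            exact this.symm
          exact hB c hspec x (by simp) (by rw [hfe, this]; rfl)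
      | false =>
        rw [List.flatMap_cons, hA c] at hpre
        rcases hpre with ⟨t, ht⟩
        simp at ht
        obtain ⟨rfl, ht2⟩ := ht
        have : xs' <+: rest'.flatMap f := ⟨t, ht2⟩
        have := ih (fun c hc x hx => hB c hc x (by simp [hx])) rest' (GoodTok_tail hg) this
        show ((x, false) :: xs'.map (fun c => (c, false))) <+: ((x, false) :: rest')
        exact List.cons_prefix_cons.mpr ⟨rfl, this⟩

theorem no_brace_BLtail : ∀ x ∈ ['B','A','C','K','S','L','A','S','H','}'], x ≠ '{' := by
  intro x hx; simp at hx
  rcases hx with rfl|rfl|rfl|rfl|rfl|rfl|rfl|rfl|rfl|rfl <;> decide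

theorem no_brace_CMtail : ∀ x ∈ ['C','O','M','M','A','}'], x ≠ '{' := by
  intro x hx; simp at hx
  rcases hx with rfl|rfl|rfl|rfl|rfl|rfl <;> decide

theorem pass_SP_BL (rep v : List Char) : replM SPs rep (BLs ++ v) = BLs ++ replM SPs rep v := by
  show replM SPs rep ('{' :: (['B','A','C','K','S','L','A','S','H','}'] ++ v)) = _
  rw [replM_pass SPs rep '{' (['B','A','C','K','S','L','A','S','H','}'] ++ v)
        (not_prefix2_snd' '{' 'S' '{' 'B' _ _ (by decide)),
      replM_lit SPs rep '{' rfl ['B','A','C','K','S','L','A','S','H','}'] v no_brace_BLtail]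
  rfl

theorem pass_SP_CM (rep v : List Char) : replM SPs rep (CMs ++ v) = CMs ++ replM SPs rep v := by
  show replM SPs rep ('{' :: (['C','O','M','M','A','}'] ++ v)) = _
  rw [replM_pass SPs rep '{' (['C','O','M','M','A','}'] ++ v)
        (not_prefix2_snd' '{' 'S' '{' 'C' _ _ (by decide)),
      replM_lit SPs rep '{' rfl ['C','O','M','M','A','}'] v no_brace_CMtail]
  rfl

theorem pass_CM_BL (rep v : List Char) : replM CMs rep (BLs ++ v) = BLs ++ replM CMs rep v := by
  show replM CMs rep ('{' :: (['B','A','C','K','S','L','A','S','H','}'] ++ v)) = _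
  rw [replM_pass CMs rep '{' (['B','A','C','K','S','L','A','S','H','}'] ++ v)
        (not_prefix2_snd' '{' 'C' '{' 'B' _ _ (by decide)),
      replM_lit CMs rep '{' rfl ['B','A','C','K','S','L','A','S','H','}'] v no_brace_BLtail]
  rfl

theorem stage1 (cur : List (Char × Bool)) (hg : GoodTok cur)
    (hf : ¬ (SPs.map (fun c => (c, false))) <:+: cur) :
    replM SPs [' '] (ren1 cur) = ren2 cur := by
  induction cur with
  | nil => simp [ren1, ren2, replM_nil]
  | cons x rest ih =>
    have hgr := GoodTok_tail hg
    have hfr : ¬ (SPs.map (fun c => (c, false))) <:+: rest := fun h => hf (infix_of_infix_tail h)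
    obtain ⟨c, b⟩ := x
    cases b with
    | true =>
      rcases (hg (c, true) (by simp)).1 rfl with rfl | rfl | rfl
      · rw [show ren1 (('\\', true) :: rest) = BLs ++ ren1 rest from rfl,
            pass_SP_BL, ih hgr hfr]
        rfl
      · rw [show ren1 ((' ', true) :: rest) = SPs ++ ren1 rest from rfl,
            replM_match _ _ _ (by simp [SPs]), ih hgr hfr]
        rfl
      · rw [show ren1 ((',', true) :: rest) = CMs ++ ren1 rest from rfl,
            pass_SP_CM, ih hgr hfr]
        rfl
    | false =>
      rw [show ren1 ((c, false) :: rest) = c :: ren1 rest from rfl]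
      by_cases hbrace : c = '{'
      · subst hbrace
        have hnp : ¬ SPs <+: ('{' :: ren1 rest) := by
          intro hp
          have h2 : ['S','P','A','C','E','}'] <+: ren1 rest :=
            (List.cons_prefix_cons.mp hp).2
          have h3 := lit_prefix_gen f1 ['S','P','A','C','E','}']
            (fun c => rfl)
            (fun c hc => by
              rcases hc with rfl | rfl | rfl
              · show BLs ≠ []; simp [BLs]
              · show SPs ≠ []; simp [SPs]
              · show CMs ≠ []; simp [CMs])
            (fun c hc x hx => by
              simp at hx
              rcases hc with rfl | rfl | rfl <;>
                rcases hx with rfl | rfl | rfl | rfl | rfl | rfl <;>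
                  first
                  | (show BLs.head? ≠ _; simp [BLs])
                  | (show SPs.head? ≠ _; simp [SPs])
                  | (show CMs.head? ≠ _; simp [CMs]))
            rest hgr h2
          exact hf (List.IsPrefix.isInfix
            (show (SPs.map (fun c => (c, false))) <+: (('{', false) :: rest) from
              List.cons_prefix_cons.mpr ⟨rfl, h3⟩))
        rw [replM_pass _ _ _ _ hnp, ih hgr hfr]
        rfl
      · rw [replM_pass SPs [' '] c (ren1 rest)
              (show ¬ SPs <+: (c :: ren1 rest) from
                not_prefix_fst '{' c ['S','P','A','C','E','}'] (ren1 rest) (fun hh => hbrace hh.symm)),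
            ih hgr hfr]
        rfl

theorem stage2 (cur : List (Char × Bool)) (hg : GoodTok cur)
    (hf : ¬ (CMs.map (fun c => (c, false))) <:+: cur) :
    replM CMs [','] (ren2 cur) = ren3 cur := by
  induction cur with
  | nil => simp [ren2, ren3, replM_nil]
  | cons x rest ih =>
    have hgr := GoodTok_tail hg
    have hfr : ¬ (CMs.map (fun c => (c, false))) <:+: rest := fun h => hf (infix_of_infix_tail h)
    obtain ⟨c, b⟩ := x
    cases b with
    | true =>
      rcases (hg (c, true) (by simp)).1 rfl with rfl | rfl | rfl
      · rw [show ren2 (('\\', true) :: rest) = BLs ++ ren2 rest from rfl,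
            pass_CM_BL, ih hgr hfr]
        rfl
      · rw [show ren2 ((' ', true) :: rest) = ' ' :: ren2 rest from rfl,
            replM_pass CMs [','] ' ' (ren2 rest)
              (show ¬ CMs <+: (' ' :: ren2 rest) from
                not_prefix_fst '{' ' ' ['C','O','M','M','A','}'] (ren2 rest) (by decide)),
            ih hgr hfr]
        rfl
      · rw [show ren2 ((',', true) :: rest) = CMs ++ ren2 rest from rfl,
            replM_match _ _ _ (by simp [CMs]), ih hgr hfr]
        rfl
    | false =>
      rw [show ren2 ((c, false) :: rest) = c :: ren2 rest from rfl]
      by_cases hbrace : c = '{'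
      · subst hbrace
        have hnp : ¬ CMs <+: ('{' :: ren2 rest) := by
          intro hp
          have h2 : ['C','O','M','M','A','}'] <+: ren2 rest :=
            (List.cons_prefix_cons.mp hp).2
          have h3 := lit_prefix_gen f2 ['C','O','M','M','A','}']
            (fun c => rfl)
            (fun c hc => by
              rcases hc with rfl | rfl | rfl
              · show BLs ≠ []; simp [BLs]
              · show [' '] ≠ ([] : List Char); simp
              · show CMs ≠ []; simp [CMs])
            (fun c hc x hx => by
              simp at hx
              rcases hc with rfl | rfl | rfl <;>
                rcases hx with rfl | rfl | rfl | rfl | rfl | rfl <;>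
                  first
                  | (show BLs.head? ≠ _; simp [BLs])
                  | (show [' '].head? ≠ _; simp)
                  | (show CMs.head? ≠ _; simp [CMs]))
            rest hgr h2
          exact hf (List.IsPrefix.isInfix
            (show (CMs.map (fun c => (c, false))) <+: (('{', false) :: rest) from
              List.cons_prefix_cons.mpr ⟨rfl, h3⟩))
        rw [replM_pass _ _ _ _ hnp, ih hgr hfr]
        rfl
      · rw [replM_pass CMs [','] c (ren2 rest)
              (show ¬ CMs <+: (c :: ren2 rest) from
                not_prefix_fst '{' c ['C','O','M','M','A','}'] (ren2 rest) (fun hh => hbrace hh.symm)),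
            ih hgr hfr]
        rfl

theorem stage3 (cur : List (Char × Bool)) (hg : GoodTok cur)
    (hf : ¬ (BLs.map (fun c => (c, false))) <:+: cur) :
    replM BLs ['\\'] (ren3 cur) = cur.map Prod.fst := by
  induction cur with
  | nil => simp [ren3, replM_nil]
  | cons x rest ih =>
    have hgr := GoodTok_tail hg
    have hfr : ¬ (BLs.map (fun c => (c, false))) <:+: rest := fun h => hf (infix_of_infix_tail h)
    obtain ⟨c, b⟩ := x
    cases b with
    | true =>
      rcases (hg (c, true) (by simp)).1 rfl with rfl | rfl | rfl
      · rw [show ren3 (('\\', true) :: rest) = BLs ++ ren3 rest from rfl,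
            replM_match _ _ _ (by simp [BLs]), ih hgr hfr]
        rfl
      · rw [show ren3 ((' ', true) :: rest) = ' ' :: ren3 rest from rfl,
            replM_pass BLs ['\\'] ' ' (ren3 rest)
              (show ¬ BLs <+: (' ' :: ren3 rest) from
                not_prefix_fst '{' ' ' ['B','A','C','K','S','L','A','S','H','}'] (ren3 rest) (by decide)),
            ih hgr hfr]
        rfl
      · rw [show ren3 ((',', true) :: rest) = ',' :: ren3 rest from rfl,
            replM_pass BLs ['\\'] ',' (ren3 rest)
              (show ¬ BLs <+: (',' :: ren3 rest) from
                not_prefix_fst '{' ',' ['B','A','C','K','S','L','A','S','H','}'] (ren3 rest) (by decide)),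
            ih hgr hfr]
        rfl
    | false =>
      rw [show ren3 ((c, false) :: rest) = c :: ren3 rest from rfl]
      by_cases hbrace : c = '{'
      · subst hbrace
        have hnp : ¬ BLs <+: ('{' :: ren3 rest) := by
          intro hp
          have h2 : ['B','A','C','K','S','L','A','S','H','}'] <+: ren3 rest :=
            (List.cons_prefix_cons.mp hp).2
          have h3 := lit_prefix_gen f3 ['B','A','C','K','S','L','A','S','H','}']
            (fun c => rfl)
            (fun c hc => by
              rcases hc with rfl | rfl | rfl
              · show BLs ≠ []; simp [BLs]
              · show [' '] ≠ ([] : List Char); simp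
              · show [','] ≠ ([] : List Char); simp)
            (fun c hc x hx => by
              simp at hx
              rcases hc with rfl | rfl | rfl <;>
                rcases hx with rfl | rfl | rfl | rfl | rfl | rfl | rfl | rfl | rfl | rfl <;>
                  first
                  | (show BLs.head? ≠ _; simp [BLs])
                  | (show [' '].head? ≠ _; simp)
                  | (show [','].head? ≠ _; simp))
            rest hgr h2
          exact hf (List.IsPrefix.isInfix
            (show (BLs.map (fun c => (c, false))) <+: (('{', false) :: rest) from
              List.cons_prefix_cons.mpr ⟨rfl, h3⟩))
        rw [replM_pass _ _ _ _ hnp, ih hgr hfr]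
        rfl
      · rw [replM_pass BLs ['\\'] c (ren3 rest)
              (show ¬ BLs <+: (c :: ren3 rest) from
                not_prefix_fst '{' c ['B','A','C','K','S','L','A','S','H','}'] (ren3 rest) (fun hh => hbrace hh.symm)),
            ih hgr hfr]
        rfl
theorem lstrip_cons (c : Char) (l : List Char) :
    PySem.Chars.lstrip (c :: l) = if PySem.Chars.isspace c then PySem.Chars.lstrip l else c :: l := by
  simp only [PySem.Chars.lstrip, List.dropWhile]
  split <;> rename_i h <;> simp [h]
theorem rstrip_nil : PySem.Chars.rstrip [] = [] := rfl
theorem strip_eq (l : List Char) : PySem.Chars.strip l = PySem.Chars.rstrip (PySem.Chars.lstrip l) := rfl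
theorem rstrip_snoc (c : Char) (cs : List Char) (h : PySem.Chars.isspace c = true) :
    PySem.Chars.rstrip (cs ++ [c]) = PySem.Chars.rstrip cs := by
  simp [PySem.Chars.rstrip, h]
theorem rstrip_snoc_keep (c : Char) (cs : List Char) (h : PySem.Chars.isspace c = false) :
    PySem.Chars.rstrip (cs ++ [c]) = cs ++ [c] := by
  simp [PySem.Chars.rstrip, h]

theorem ph_ne_nil (c : Char) : ph c ≠ [] := by
  unfold ph
  split_ifs <;> simp [BL_eq, BLs, SP_eq, SPs, CM_eq, CMs]

theorem f1_ne_nil (x : Char × Bool) : f1 x ≠ [] := by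
  obtain ⟨c, b⟩ := x
  cases b
  · simp [f1]
  · simpa [f1] using ph_ne_nil c

theorem ren1_nil_iff (cur : List (Char × Bool)) : ren1 cur = [] ↔ cur = [] := by
  cases cur with
  | nil => simp [ren1]
  | cons x rest =>
    simp [ren1, List.flatMap_cons]
    intro h
    exact absurd h (f1_ne_nil x)

theorem decode_ren (cur : List (Char × Bool)) (hg : GoodTok cur) (hf : FFTok cur) :
    pvDecode (ren1 cur) = cur.map Prod.fst := by
  unfold pvDecode
  rw [replace_eq_replM _ _ _ (by simp [BL_eq, BLs, SP_eq, SPs, CM_eq, CMs]),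
      replace_eq_replM _ _ _ (by simp [BL_eq, BLs, SP_eq, SPs, CM_eq, CMs]),
      replace_eq_replM _ _ _ (by simp [BL_eq, BLs, SP_eq, SPs, CM_eq, CMs]),
      SP_eq, CM_eq, BL_eq,
      stage1 cur hg hf.2.1, stage2 cur hg hf.2.2, stage3 cur hg hf.1]

theorem GoodTok_sub {l m : List (Char × Bool)} (h : l ⊆ m) (hg : GoodTok m) : GoodTok l :=
  fun x hx => hg x (h hx)

theorem lstrip_ren1 (cur : List (Char × Bool)) (hg : GoodTok cur) :
    PySem.Chars.lstrip (ren1 cur) = ren1 (cur.dropWhile pvIsSp) := by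
  induction cur with
  | nil => rfl
  | cons x rest ih =>
    obtain ⟨c, b⟩ := x
    cases b with
    | true =>
      rw [List.dropWhile_cons_of_neg (by simp [pvIsSp])]
      rcases (hg (c, true) (by simp)).1 rfl with rfl | rfl | rfl
      · rw [show ren1 (('\\', true) :: rest) = '{' :: (['B','A','C','K','S','L','A','S','H','}'] ++ ren1 rest) from rfl, lstrip_cons]
        simp [show PySem.Chars.isspace '{' = false from rfl]
      · rw [show ren1 ((' ', true) :: rest) = '{' :: (['S','P','A','C','E','}'] ++ ren1 rest) from rfl, lstrip_cons]
        simp [show PySem.Chars.isspace '{' = false from rfl]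
      · rw [show ren1 ((',', true) :: rest) = '{' :: (['C','O','M','M','A','}'] ++ ren1 rest) from rfl, lstrip_cons]
        simp [show PySem.Chars.isspace '{' = false from rfl]
    | false =>
      rw [show ren1 ((c, false) :: rest) = c :: ren1 rest from rfl, lstrip_cons]
      cases hsp : PySem.Chars.isspace c with
      | true =>
        rw [if_pos rfl, List.dropWhile_cons_of_pos (by simp [pvIsSp, hsp])]
        exact ih (GoodTok_tail hg)
      | false =>
        rw [if_neg (by simp), List.dropWhile_cons_of_neg (by simp [pvIsSp, hsp])]
        rfl

theorem rstrip_ren1 (cur : List (Char × Bool)) (hg : GoodTok cur) :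
    PySem.Chars.rstrip (ren1 cur) = ren1 ((cur.reverse.dropWhile pvIsSp).reverse) := by
  induction cur using List.reverseRecOn with
  | nil => rfl
  | append_singleton xs x ih =>
    have hgx : GoodTok xs := GoodTok_sub (by intro y hy; simp [hy]) hg
    obtain ⟨c, b⟩ := x
    rw [show ren1 (xs ++ [(c, b)]) = ren1 xs ++ f1 (c, b) by simp [ren1]]
    cases b with
    | true =>
      rw [show (xs ++ [(c, true)]).reverse = (c, true) :: xs.reverse by simp,
          show ((c, true) :: xs.reverse).dropWhile pvIsSp
            = (c, true) :: xs.reverse from List.dropWhile_cons_of_neg (by simp [pvIsSp])]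
      rcases (hg (c, true) (by simp)).1 rfl with rfl | rfl | rfl
      · rw [show f1 ('\\', true) = ['{','B','A','C','K','S','L','A','S','H'] ++ ['}'] from rfl,
            ← List.append_assoc, rstrip_snoc_keep '}' _ rfl]
        simp [ren1]
        rfl
      · rw [show f1 (' ', true) = ['{','S','P','A','C','E'] ++ ['}'] from rfl,
            ← List.append_assoc, rstrip_snoc_keep '}' _ rfl]
        simp [ren1]
        rfl
      · rw [show f1 (',', true) = ['{','C','O','M','M','A'] ++ ['}'] from rfl,
            ← List.append_assoc, rstrip_snoc_keep '}' _ rfl]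
        simp [ren1]
        rfl
    | false =>
      rw [show f1 (c, false) = [c] from rfl,
          show (xs ++ [(c, false)]).reverse = (c, false) :: xs.reverse by simp]
      cases hsp : PySem.Chars.isspace c with
      | true =>
        rw [rstrip_snoc c _ hsp, ih hgx,
            show ((c, false) :: xs.reverse).dropWhile pvIsSp
              = xs.reverse.dropWhile pvIsSp from List.dropWhile_cons_of_pos (by simp [pvIsSp, hsp])]
      | false =>
        rw [rstrip_snoc_keep c _ hsp,
            show ((c, false) :: xs.reverse).dropWhile pvIsSp
              = (c, false) :: xs.reverse from List.dropWhile_cons_of_neg (by simp [pvIsSp, hsp])]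
        simp [ren1]
        rfl

theorem trimB_infix {l : List (Char × Bool)} :
    ((l.reverse.dropWhile pvIsSp).reverse) <+: l := by
  have h1 : l.reverse.dropWhile pvIsSp <:+ l.reverse := List.dropWhile_suffix _
  have := List.reverse_prefix.mpr h1
  simpa using this

theorem FFTok_mono {l m : List (Char × Bool)} (h : l <:+: m) (hf : FFTok m) : FFTok l := by
  refine ⟨fun hx => hf.1 (hx.trans h), fun hx => hf.2.1 (hx.trans h), fun hx => hf.2.2 (hx.trans h)⟩

theorem flush_eq (cur : List (Char × Bool)) (hg : GoodTok cur) (hf : FFTok cur) :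
    pvFlush cur = if PySem.Chars.strip (ren1 cur) = [] then []
                  else [String.ofList (pvDecode (PySem.Chars.strip (ren1 cur)))] := by
  have hg1 : GoodTok (cur.dropWhile pvIsSp) :=
    GoodTok_sub (List.Sublist.subset (List.dropWhile_sublist _)) hg
  have hstrip : PySem.Chars.strip (ren1 cur)
      = ren1 (((cur.dropWhile pvIsSp).reverse.dropWhile pvIsSp).reverse) := by
    rw [strip_eq, lstrip_ren1 cur hg, rstrip_ren1 _ hg1]
  have hg2 : GoodTok (((cur.dropWhile pvIsSp).reverse.dropWhile pvIsSp).reverse) :=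
    GoodTok_sub (List.IsPrefix.subset (trimB_infix)) hg1
  have hinfix : (((cur.dropWhile pvIsSp).reverse.dropWhile pvIsSp).reverse) <:+: cur :=
    (trimB_infix.isInfix).trans (List.dropWhile_suffix _).isInfix
  have hf2 := FFTok_mono hinfix hf
  rw [hstrip]
  unfold pvFlush
  by_cases hnil : (((cur.dropWhile pvIsSp).reverse.dropWhile pvIsSp).reverse) = []
  · simp only [hnil, if_pos rfl, if_pos ((ren1_nil_iff _).mpr rfl)]
    simp [ren1_nil_iff, hnil]
  · rw [if_neg ((fun h => hnil ((ren1_nil_iff _).mp h)) : ¬ ren1 _ = [])]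
    simp only [hnil, if_neg]
    rw [decode_ren _ hg2 hf2]
    simp [hnil]

-- structural single-character splitter (model of split(sep)) and the two-delimiter splitter
def pvSplit (d : Char) : List Char → List (List Char)
  | [] => [[]]
  | c :: cs => if c = d then [] :: pvSplit d cs else List.modifyHead (fun h => c :: h) (pvSplit d cs)

def pvSplit2 : List Char → List (List Char)
  | [] => [[]]
  | c :: cs => if c = ' ' ∨ c = ',' then [] :: pvSplit2 cs else List.modifyHead (fun h => c :: h) (pvSplit2 cs)

theorem pvSplit_ne_nil (d : Char) (cs : List Char) : pvSplit d cs ≠ [] := by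
  induction cs with
  | nil => simp [pvSplit]
  | cons c cs ih =>
    simp only [pvSplit]
    split
    · simp
    · cases h : pvSplit d cs with
      | nil => exact absurd h ih
      | cons a t => simp [List.modifyHead]

theorem pvSplit2_ne_nil (cs : List Char) : pvSplit2 cs ≠ [] := by
  induction cs with
  | nil => simp [pvSplit2]
  | cons c cs ih =>
    simp only [pvSplit2]
    split
    · simp
    · cases h : pvSplit2 cs with
      | nil => exact absurd h ih
      | cons a t => simp [List.modifyHead]

theorem splitOn_go_eq (d : Char) (l : List Char) : ∀ (fuel : Nat) (cur : List Char) (acc : List (List Char)),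
    l.length ≤ fuel →
    PySem.Chars.splitOn.go [d] fuel l cur acc
      = acc.reverse ++ List.modifyHead (fun h => cur.reverse ++ h) (pvSplit d l) := by
  induction l with
  | nil =>
    intro fuel cur acc _
    cases fuel <;> simp [PySem.Chars.splitOn.go, pvSplit, List.modifyHead]
  | cons c rest ih =>
    intro fuel cur acc hle
    cases fuel with
    | zero => simp at hle
    | succ f =>
      have hrest : rest.length ≤ f := by simp at hle; omega
      by_cases hc : c = d
      · subst hc
        have hpre : List.isPrefixOf [c] (c :: rest) = true := by
          simp [List.isPrefixOf]
        rw [show PySem.Chars.splitOn.go [c] (f+1) (c :: rest) cur acc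
              = PySem.Chars.splitOn.go [c] f (List.drop [c].length (c :: rest)) [] (cur.reverse :: acc) by
            simp [PySem.Chars.splitOn.go, hpre]]
        rw [List.length_singleton, List.drop_one, List.tail_cons, ih f [] (cur.reverse :: acc) hrest]
        cases hsp : pvSplit c rest with
        | nil => exact absurd hsp (pvSplit_ne_nil c rest)
        | cons a t => simp [pvSplit, List.modifyHead, hsp]
      · have hpre : List.isPrefixOf [d] (c :: rest) = false := by
          simp [List.isPrefixOf]
          exact fun h => absurd h.symm hc
        rw [show PySem.Chars.splitOn.go [d] (f+1) (c :: rest) cur acc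
              = PySem.Chars.splitOn.go [d] f rest (c :: cur) acc by
            simp [PySem.Chars.splitOn.go, hpre]]
        rw [ih f (c :: cur) acc hrest]
        cases hsp : pvSplit d rest with
        | nil => exact absurd hsp (pvSplit_ne_nil d rest)
        | cons a t => simp [pvSplit, List.modifyHead, hsp, hc]

theorem splitOn_eq (cs : List Char) (d : Char) : PySem.Chars.splitOn cs [d] = pvSplit d cs := by
  rw [show PySem.Chars.splitOn cs [d] = PySem.Chars.splitOn.go [d] (cs.length + 1) cs [] [] from rfl]
  rw [splitOn_go_eq d cs (cs.length + 1) [] [] (by omega)]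
  cases hsp : pvSplit d cs with
  | nil => exact absurd hsp (pvSplit_ne_nil d cs)
  | cons a t => simp [List.modifyHead]

theorem modifyHead_append {α : Type} (f : α → α) (xs ys : List α) (h : xs ≠ []) :
    List.modifyHead f (xs ++ ys) = List.modifyHead f xs ++ ys := by
  cases xs with
  | nil => exact absurd rfl h
  | cons a t => simp [List.modifyHead]

-- comma-split then space-split = one two-delimiter split
theorem comma_space (s : List Char) :
    (pvSplit ',' s).flatMap (pvSplit ' ') = pvSplit2 s := by
  induction s with
  | nil => simp [pvSplit, pvSplit2]
  | cons c cs ih =>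
    by_cases hcomma : c = ','
    · subst hcomma
      rw [show pvSplit ',' (',' :: cs) = [] :: pvSplit ',' cs from by simp [pvSplit],
          List.flatMap_cons, ih,
          show pvSplit2 (',' :: cs) = [] :: pvSplit2 cs from by simp [pvSplit2]]
      simp [pvSplit]
    · cases hsp : pvSplit ',' cs with
      | nil => exact absurd hsp (pvSplit_ne_nil ',' cs)
      | cons t ts =>
        have l1 : pvSplit ',' (c :: cs) = (c :: t) :: ts := by
          simp [pvSplit, hcomma, hsp, List.modifyHead]
        have ihx : pvSplit ' ' t ++ (ts.flatMap (pvSplit ' ')) = pvSplit2 cs := by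
          rw [← ih, hsp, List.flatMap_cons]
        rw [l1, List.flatMap_cons]
        by_cases hspace : c = ' '
        · subst hspace
          rw [show pvSplit ' ' (' ' :: t) = [] :: pvSplit ' ' t from by simp [pvSplit],
              show pvSplit2 (' ' :: cs) = [] :: pvSplit2 cs from by simp [pvSplit2]]
          rw [← ihx]
          simp
        · rw [show pvSplit ' ' (c :: t) = List.modifyHead (fun h => c :: h) (pvSplit ' ' t) from by
                simp [pvSplit, hspace],
              ← modifyHead_append _ _ _ (pvSplit_ne_nil ' ' t), ihx,
              show pvSplit2 (c :: cs) = List.modifyHead (fun h => c :: h) (pvSplit2 cs) from by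
                simp [pvSplit2, hcomma, hspace]]

-- token machinery from the split side
def pvTok (cs : List Char) : List (List Char) :=
  ((pvSplit ' ' cs).map PySem.Chars.strip).filter (fun t => t ≠ [])

def pvModLast (f : List Char → List Char) : List (List Char) → List (List Char)
  | [] => []
  | [x] => [f x]
  | x :: y :: t => x :: pvModLast f (y :: t)

theorem strip_cons (c : Char) (cs : List Char) (h : PySem.Chars.isspace c = true) :
    PySem.Chars.strip (c :: cs) = PySem.Chars.strip cs := by
  simp [PySem.Chars.strip, PySem.Chars.lstrip, List.dropWhile, h]

theorem strip_snoc (c : Char) (cs : List Char) (h : PySem.Chars.isspace c = true) :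
    PySem.Chars.strip (cs ++ [c]) = PySem.Chars.strip cs := by
  simp only [PySem.Chars.strip, PySem.Chars.lstrip, List.dropWhile_append]
  split
  · next hempty =>
    simp only [List.isEmpty_iff] at hempty
    simp [hempty, List.dropWhile, h, PySem.Chars.rstrip]
  · exact rstrip_snoc c _ h

theorem pvModLast_cons (f : List Char → List Char) (x : List Char) (xs : List (List Char)) (h : xs ≠ []) :
    pvModLast f (x :: xs) = x :: pvModLast f xs := by
  cases xs with
  | nil => exact absurd rfl h
  | cons y t => rfl

theorem modLast_modifyHead (c' c : Char) (l : List (List Char)) :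
    List.modifyHead (fun h => c' :: h) (pvModLast (fun h => h ++ [c]) l)
      = pvModLast (fun h => h ++ [c]) (List.modifyHead (fun h => c' :: h) l) := by
  cases l with
  | nil => rfl
  | cons x xs =>
    cases xs with
    | nil => simp [pvModLast, List.modifyHead]
    | cons y t => simp [pvModLast, List.modifyHead]

theorem pvSplit_snoc (d c : Char) (cs : List Char) :
    pvSplit d (cs ++ [c])
      = if c = d then pvSplit d cs ++ [[]] else pvModLast (fun h => h ++ [c]) (pvSplit d cs) := by
  induction cs with
  | nil => by_cases hc : c = d <;> simp [pvSplit, hc, pvModLast]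
  | cons c' cs ih =>
    by_cases hc' : c' = d
    · subst hc'
      simp only [List.cons_append, pvSplit, if_pos rfl]
      rw [ih]
      by_cases hc : c = c' <;>
        simp [hc, pvModLast_cons _ _ _ (pvSplit_ne_nil c' cs)]
    · simp only [List.cons_append, pvSplit, if_neg hc']
      rw [ih]
      by_cases hc : c = d
      · simp only [if_pos hc]
        rw [modifyHead_append _ _ _ (pvSplit_ne_nil d cs)]
      · simp only [if_neg hc]
        rw [modLast_modifyHead]

theorem map_strip_modLast (c : Char) (h : PySem.Chars.isspace c = true) (l : List (List Char)) :
    (pvModLast (fun t => t ++ [c]) l).map PySem.Chars.strip = l.map PySem.Chars.strip := by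
  induction l with
  | nil => rfl
  | cons x xs ih =>
    cases xs with
    | nil => simp [pvModLast, strip_snoc c x h]
    | cons y t =>
      rw [pvModLast_cons _ _ _ (by simp)]
      simpa using ih

theorem strip_nil : PySem.Chars.strip [] = [] := rfl

theorem pvTok_cons (c : Char) (cs : List Char) (h : PySem.Chars.isspace c = true) :
    pvTok (c :: cs) = pvTok cs := by
  by_cases hc : c = ' '
  · subst hc
    simp [pvTok, pvSplit, strip_nil]
  · cases hsp : pvSplit ' ' cs with
    | nil => exact absurd hsp (pvSplit_ne_nil ' ' cs)
    | cons a t =>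
      simp [pvTok, pvSplit, hc, hsp, List.modifyHead, strip_cons c a h]

theorem pvTok_snoc (c : Char) (cs : List Char) (h : PySem.Chars.isspace c = true) :
    pvTok (cs ++ [c]) = pvTok cs := by
  unfold pvTok
  rw [pvSplit_snoc]
  by_cases hc : c = ' '
  · simp [hc, List.filter_append, strip_nil]
  · rw [if_neg hc, map_strip_modLast c h]

theorem pvTok_lstrip (cs : List Char) : pvTok (PySem.Chars.lstrip cs) = pvTok cs := by
  simp only [PySem.Chars.lstrip]
  induction cs with
  | nil => rfl
  | cons c cs ih =>
    cases hsp : PySem.Chars.isspace c with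
    | false => simp [List.dropWhile, hsp]
    | true => rw [List.dropWhile_cons_of_pos (by simp [hsp]), ih, pvTok_cons c cs hsp]

theorem pvTok_rstrip (cs : List Char) : pvTok (PySem.Chars.rstrip cs) = pvTok cs := by
  induction cs using List.reverseRecOn with
  | nil => rfl
  | append_singleton xs x ih =>
    cases hx : PySem.Chars.isspace x with
    | true => rw [rstrip_snoc x xs hx, pvTok_snoc x xs hx]; exact ih
    | false => rw [rstrip_snoc_keep x xs hx]

theorem pvTok_strip (cs : List Char) : pvTok (PySem.Chars.strip cs) = pvTok cs := by
  rw [strip_eq, pvTok_rstrip, pvTok_lstrip]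

theorem flatMap_filter_strip (tags : List (List Char)) :
    ((tags.map PySem.Chars.strip).filter (fun t => t ≠ [])).flatMap pvTok = tags.flatMap pvTok := by
  induction tags with
  | nil => rfl
  | cons t ts ih =>
    simp only [List.map_cons, List.filter_cons, ne_eq, decide_not] at ih ⊢
    by_cases hst : PySem.Chars.strip t = []
    · have htok : pvTok t = [] := by rw [← pvTok_strip t, hst]; rfl
      simp [hst, ih, htok]
    · simp [hst, ih, pvTok_strip t]

theorem tok_flatMap (tags : List (List Char)) :
    tags.flatMap pvTok
      = ((tags.flatMap (pvSplit ' ')).map PySem.Chars.strip).filter (fun t => t ≠ []) := by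
  induction tags with
  | nil => rfl
  | cons t ts ih => simp [pvTok, ih, List.filter_append]

theorem foldl_append_flatMap {α β : Type} (l : List α) (f : α → List β) (init : List β) :
    l.foldl (fun acc x => acc ++ f x) init = init ++ l.flatMap f := by
  induction l generalizing init with
  | nil => simp
  | cons x xs ih => simp [List.foldl, ih]

-- A's nested-split middle stage, in terms of pvSplit2
def tokensA (u : List Char) : List (List Char) :=
  ((pvSplit2 u).map PySem.Chars.strip).filter (fun t => t ≠ [])

theorem A_mid (u : List Char) :
    (((PySem.Chars.splitOn u [',']).map PySem.Chars.strip).filter (fun t => t ≠ [])).foldl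
        (fun acc tag =>
          acc ++ (((PySem.Chars.splitOn tag [' ']).map PySem.Chars.strip).filter (fun t => t ≠ []))) []
      = tokensA u := by
  rw [foldl_append_flatMap _
    (fun tag => ((PySem.Chars.splitOn tag [' ']).map PySem.Chars.strip).filter (fun t => t ≠ [])) []]
  simp only [List.nil_append, splitOn_eq]
  have h1 : (((pvSplit ',' u).map PySem.Chars.strip).filter (fun t => t ≠ [])).flatMap pvTok
      = (pvSplit ',' u).flatMap pvTok := flatMap_filter_strip (pvSplit ',' u)
  have h2 := tok_flatMap (pvSplit ',' u)
  calc ((pvSplit ',' u).map PySem.Chars.strip |>.filter (fun t => t ≠ [])).flatMap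
          (fun tag => ((pvSplit ' ' tag).map PySem.Chars.strip).filter (fun t => t ≠ []))
      = (((pvSplit ',' u).map PySem.Chars.strip).filter (fun t => t ≠ [])).flatMap pvTok := rfl
    _ = (pvSplit ',' u).flatMap pvTok := h1
    _ = (((pvSplit ',' u).flatMap (pvSplit ' ')).map PySem.Chars.strip).filter (fun t => t ≠ []) := h2
    _ = tokensA u := by rw [comma_space]; rfl

theorem ren1_no_delim (cur : List (Char × Bool)) (hg : GoodTok cur) :
    ∀ a ∈ ren1 cur, ¬ (a = ' ' ∨ a = ',') := by
  induction cur with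
  | nil => simp [ren1]
  | cons x rest ih =>
    intro a ha
    rw [show ren1 (x :: rest) = f1 x ++ ren1 rest from rfl] at ha
    rcases List.mem_append.mp ha with hmem | hmem
    · obtain ⟨c, b⟩ := x
      cases b with
      | true =>
        rcases (hg (c, true) (by simp)).1 rfl with rfl | rfl | rfl
        · rw [show f1 ('\\', true) = BLs from rfl] at hmem
          simp [BLs] at hmem
          rcases hmem with rfl | rfl | rfl | rfl | rfl | rfl | rfl | rfl | rfl | rfl | rfl <;> decide
        · rw [show f1 (' ', true) = SPs from rfl] at hmem
          simp [SPs] at hmem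
          rcases hmem with rfl | rfl | rfl | rfl | rfl | rfl | rfl <;> decide
        · rw [show f1 (',', true) = CMs from rfl] at hmem
          simp [CMs] at hmem
          rcases hmem with rfl | rfl | rfl | rfl | rfl | rfl | rfl <;> decide
      | false =>
        rw [show f1 (c, false) = [c] from rfl] at hmem
        have h2 := (hg (c, false) (by simp)).2 rfl
        simp at hmem
        subst hmem
        tauto
    · exact ih (GoodTok_tail hg) a hmem

theorem pvSplit2_prepend (u v : List Char) (hu : ∀ a ∈ u, ¬ (a = ' ' ∨ a = ',')) :
    pvSplit2 (u ++ v) = List.modifyHead (fun h => u ++ h) (pvSplit2 v) := by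
  induction u with
  | nil =>
    cases hv : pvSplit2 v with
    | nil => exact absurd hv (pvSplit2_ne_nil v)
    | cons a t => simp [List.modifyHead, hv]
  | cons x u' ih =>
    have hx := hu x (by simp)
    rw [List.cons_append,
        show pvSplit2 (x :: (u' ++ v)) = List.modifyHead (fun h => x :: h) (pvSplit2 (u' ++ v)) from by
          simp [pvSplit2, hx],
        ih (fun a ha => hu a (by simp [ha]))]
    cases hv : pvSplit2 v with
    | nil => exact absurd hv (pvSplit2_ne_nil v)
    | cons a t => simp [List.modifyHead]

def markT : List Char → List (Char × Bool)
  | [] => []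
  | c :: r =>
    if c = '\\' then
      match r with
      | d :: r' => if d = '\\' ∨ d = ' ' ∨ d = ',' then (d, true) :: markT r' else (c, false) :: markT (d :: r')
      | [] => [(c, false)]
    else (c, false) :: markT r

theorem markT_prefix : ∀ (t : List Char) (xs : List Char),
    ((xs.map (fun c => (c, false))) <+: markT t) → xs <+: t := by
  intro t
  induction t using markT.induct with
  | case1 =>
    intro xs h
    simp [markT] at h
    rcases xs with _ | ⟨x, xs'⟩
    · simp
    · simp at h
  | case2 d r' hd ih =>
    intro xs h
    rw [show markT ('\\' :: d :: r') = (d, true) :: markT r' from by simp [markT, hd]] at h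
    rcases xs with _ | ⟨x, xs'⟩
    · simp
    · rw [List.map_cons] at h
      have h1 := (List.cons_prefix_cons.mp h).1
      injection h1 with hx hb
      exact Bool.noConfusion hb
  | case3 d r' hd ih =>
    intro xs h
    rw [show markT ('\\' :: d :: r') = ('\\', false) :: markT (d :: r') from by simp [markT, hd]] at h
    rcases xs with _ | ⟨x, xs'⟩
    · simp
    · rw [List.map_cons] at h
      obtain ⟨h1, h2⟩ := List.cons_prefix_cons.mp h
      injection h1 with hx hb
      subst hx
      exact List.cons_prefix_cons.mpr ⟨rfl, ih xs' h2⟩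
  | case4 =>
    intro xs h
    rw [show markT ['\\'] = [('\\', false)] from by simp [markT]] at h
    rcases xs with _ | ⟨x, xs'⟩
    · simp
    · rw [List.map_cons] at h
      obtain ⟨h1, h2⟩ := List.cons_prefix_cons.mp h
      injection h1 with hx hb
      subst hx
      have hnil : xs' = [] := by
        have := List.prefix_nil.mp h2
        simpa using this
      subst hnil
      simp
  | case5 c r hc ih =>
    intro xs h
    rw [show markT (c :: r) = (c, false) :: markT r from by rw [markT.eq_def]; simp [hc]] at h
    rcases xs with _ | ⟨x, xs'⟩
    · simp
    · rw [List.map_cons] at h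
      obtain ⟨h1, h2⟩ := List.cons_prefix_cons.mp h
      injection h1 with hx hb
      subst hx
      exact List.cons_prefix_cons.mpr ⟨rfl, ih xs' h2⟩

theorem markT_infix : ∀ (t : List Char) (xs : List Char),
    ((xs.map (fun c => (c, false))) <:+: markT t) → xs <:+: t := by
  intro t
  induction t using markT.induct with
  | case1 =>
    intro xs h
    simp [markT] at h
    simp [h]
  | case2 d r' hd ih =>
    intro xs h
    have heq : markT ('\\' :: d :: r') = (d, true) :: markT r' := by simp [markT, hd]
    rw [heq] at h
    rcases List.infix_cons_iff.mp h with hp | hi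
    · exact (markT_prefix ('\\' :: d :: r') xs (by rw [heq]; exact hp)).isInfix
    · exact List.infix_cons_iff.mpr (Or.inr (List.infix_cons_iff.mpr (Or.inr (ih xs hi))))
  | case3 d r' hd ih =>
    intro xs h
    have heq : markT ('\\' :: d :: r') = ('\\', false) :: markT (d :: r') := by simp [markT, hd]
    rw [heq] at h
    rcases List.infix_cons_iff.mp h with hp | hi
    · exact (markT_prefix ('\\' :: d :: r') xs (by rw [heq]; exact hp)).isInfix
    · exact List.infix_cons_iff.mpr (Or.inr (ih xs hi))
  | case4 =>
    intro xs h
    have heq : markT ['\\'] = [('\\', false)] := by simp [markT]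
    rw [heq] at h
    rcases List.infix_cons_iff.mp h with hp | hi
    · exact (markT_prefix ['\\'] xs (by rw [heq]; exact hp)).isInfix
    · have : xs.map (fun c => (c, false)) = [] := List.eq_nil_of_infix_nil hi
      have hxs : xs = [] := by simpa using this
      simp [hxs]
  | case5 c r hc ih =>
    intro xs h
    have heq : markT (c :: r) = (c, false) :: markT r := by rw [markT.eq_def]; simp [hc]
    rw [heq] at h
    rcases List.infix_cons_iff.mp h with hp | hi
    · exact (markT_prefix (c :: r) xs (by rw [heq]; exact hp)).isInfix
    · exact List.infix_cons_iff.mpr (Or.inr (ih xs hi))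

theorem pvScan_esc (d : Char) (rest : List Char) (cur : List (Char × Bool)) (out : List String)
    (h : d = '\\' ∨ d = ' ' ∨ d = ',') :
    pvScan ('\\' :: d :: rest) cur out = pvScan rest (cur ++ [(d, true)]) out := by
  simp [pvScan, h]

theorem pvScan_escno (d : Char) (rest : List Char) (cur : List (Char × Bool)) (out : List String)
    (h : ¬ (d = '\\' ∨ d = ' ' ∨ d = ',')) :
    pvScan ('\\' :: d :: rest) cur out = pvScan (d :: rest) (cur ++ [('\\', false)]) out := by
  simp [pvScan, h]

theorem pvScan_nil (cur : List (Char × Bool)) (out : List String) :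
    pvScan [] cur out = out ++ pvFlush cur := rfl

theorem pvScan_single_bs (cur : List (Char × Bool)) (out : List String) :
    pvScan ['\\'] cur out = pvScan [] (cur ++ [('\\', false)]) out := by
  simp [pvScan]

theorem pvScan_cons_nodbl (c : Char) (rest : List Char) (cur : List (Char × Bool)) (out : List String)
    (hc : c ≠ '\\') :
    pvScan (c :: rest) cur out =
      if c = ' ' ∨ c = ',' then pvScan rest [] (out ++ pvFlush cur)
      else pvScan rest (cur ++ [(c, false)]) out := by
  rw [pvScan.eq_def]
  rcases rest with _ | ⟨d, r⟩
  · simp [hc]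
  · simp [hc]

theorem enc2_cons_ne (c : Char) (rest : List Char) (hc : c ≠ '\\') :
    enc2 (c :: rest) = c :: enc2 rest := by
  rw [enc2.eq_def]; simp [hc]

theorem enc2_cons_escno (d : Char) (r' : List Char) (hd : ¬ (d = '\\' ∨ d = ' ' ∨ d = ',')) :
    enc2 ('\\' :: d :: r') = '\\' :: enc2 (d :: r') := by
  have h1 : d ≠ '\\' := fun h => hd (Or.inl h)
  have h2 : d ≠ ' ' := fun h => hd (Or.inr (Or.inl h))
  have h3 : d ≠ ',' := fun h => hd (Or.inr (Or.inr h))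
  rw [enc2.eq_def]
  simp [h1, h2, h3]

theorem ren1_append (u v : List (Char × Bool)) : ren1 (u ++ v) = ren1 u ++ ren1 v := by
  simp [ren1]

theorem GoodTok_nil : GoodTok [] := fun x hx => absurd hx (by simp)

theorem GoodTok_snoc (cur : List (Char × Bool)) (x : Char × Bool) (hg : GoodTok cur)
    (hx : (x.2 = true → (x.1 = '\\' ∨ x.1 = ' ' ∨ x.1 = ',')) ∧ (x.2 = false → x.1 ≠ ' ' ∧ x.1 ≠ ',')) :
    GoodTok (cur ++ [x]) := by
  intro y hy
  rcases List.mem_append.mp hy with h | h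
  · exact hg y h
  · simp at h; subst h; exact hx

theorem tokensA_prepend (u v : List Char) (c : Char) (hu : ∀ a ∈ u, ¬ (a = ' ' ∨ a = ','))
    (hc : c = ' ' ∨ c = ',') :
    tokensA (u ++ c :: v)
      = (if PySem.Chars.strip u = [] then [] else [PySem.Chars.strip u]) ++ tokensA v := by
  unfold tokensA
  rw [pvSplit2_prepend u (c :: v) hu,
      show pvSplit2 (c :: v) = [] :: pvSplit2 v from by simp [pvSplit2, hc]]
  simp only [List.modifyHead, List.append_nil, List.map_cons, List.filter_cons]
  by_cases hs : PySem.Chars.strip u = []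
  · simp [hs]
  · simp [hs]

theorem tokensA_only (u : List Char) (hu : ∀ a ∈ u, ¬ (a = ' ' ∨ a = ','))  :
    tokensA u = if PySem.Chars.strip u = [] then [] else [PySem.Chars.strip u] := by
  have hsp : pvSplit2 u = [u] := by
    conv_lhs => rw [← List.append_nil u]
    rw [pvSplit2_prepend u [] hu]
    simp [pvSplit2, List.modifyHead]
  unfold tokensA
  rw [hsp]
  by_cases hs : PySem.Chars.strip u = []
  · simp [hs]
  · simp [hs]

theorem flush_eq' (cur : List (Char × Bool)) (hg : GoodTok cur) (hf : FFTok cur) :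
    pvFlush cur = (if PySem.Chars.strip (ren1 cur) = [] then []
                   else [PySem.Chars.strip (ren1 cur)]).map (fun e => String.ofList (pvDecode e)) := by
  rw [flush_eq cur hg hf]
  by_cases hs : PySem.Chars.strip (ren1 cur) = [] <;> simp [hs]

theorem FFTok_self_of_append_left {l m : List (Char × Bool)} (hf : FFTok (l ++ m)) : FFTok l :=
  FFTok_mono ⟨[], m, by simp⟩ hf

theorem FFTok_self_of_append_right {l m : List (Char × Bool)} (hf : FFTok (l ++ m)) : FFTok m :=
  FFTok_mono ⟨l, [], by simp⟩ hf

theorem scan_main : ∀ (t : List Char), ∀ (cur : List (Char × Bool)) (out : List String),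
    GoodTok cur → FFTok (cur ++ markT t) →
    pvScan t cur out
      = out ++ (tokensA (ren1 cur ++ enc2 t)).map (fun e => String.ofList (pvDecode e)) := by
  intro t
  induction t using markT.induct with
  | case1 =>
    intro cur out hg hf
    rw [pvScan_nil, show enc2 [] = [] from rfl, List.append_nil,
        tokensA_only (ren1 cur) (ren1_no_delim cur hg),
        flush_eq' cur hg (by rw [show markT [] = [] from rfl, List.append_nil] at hf; exact hf)]
  | case2 d r' hd ih =>
    intro cur out hg hf
    have hgood2 : GoodTok (cur ++ [(d, true)]) :=
      GoodTok_snoc cur (d, true) hg (by constructor <;> intro h <;> simp_all)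
    have heqm : markT ('\\' :: d :: r') = (d, true) :: markT r' := by simp [markT, hd]
    have hff2 : FFTok ((cur ++ [(d, true)]) ++ markT r') := by
      rw [heqm] at hf
      simpa [List.append_assoc] using hf
    rw [pvScan_esc d r' cur out hd, ih (cur ++ [(d, true)]) out hgood2 hff2]
    rcases hd with rfl | rfl | rfl
    · rw [show enc2 ('\\' :: '\\' :: r') = BLs ++ enc2 r' from rfl, ren1_append]
      simp [ren1, f1, ph, BL_eq]
    · rw [show enc2 ('\\' :: ' ' :: r') = SPs ++ enc2 r' from rfl, ren1_append]
      simp [ren1, f1, ph, SP_eq]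
    · rw [show enc2 ('\\' :: ',' :: r') = CMs ++ enc2 r' from rfl, ren1_append]
      simp [ren1, f1, ph, CM_eq]
  | case3 d r' hd ih =>
    intro cur out hg hf
    have hgood2 : GoodTok (cur ++ [('\\', false)]) :=
      GoodTok_snoc cur ('\\', false) hg (by constructor <;> intro h <;> simp_all)
    have heqm : markT ('\\' :: d :: r') = ('\\', false) :: markT (d :: r') := by simp [markT, hd]
    have hff2 : FFTok ((cur ++ [('\\', false)]) ++ markT (d :: r')) := by
      rw [heqm] at hf
      simpa [List.append_assoc] using hf
    rw [pvScan_escno d r' cur out hd, ih (cur ++ [('\\', false)]) out hgood2 hff2,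
        enc2_cons_escno d r' hd, ren1_append]
    simp [ren1, f1]
  | case4 =>
    intro cur out hg hf
    have heqm : markT ['\\'] = [('\\', false)] := by simp [markT]
    rw [heqm] at hf
    have hgood2 : GoodTok (cur ++ [('\\', false)]) :=
      GoodTok_snoc cur ('\\', false) hg (by constructor <;> intro h <;> simp_all)
    rw [pvScan_single_bs, pvScan_nil,
        show enc2 ['\\'] = ['\\'] from rfl,
        show ren1 cur ++ ['\\'] = ren1 (cur ++ [('\\', false)]) from by simp [ren1_append, ren1, f1],
        tokensA_only _ (ren1_no_delim _ hgood2),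
        flush_eq' _ hgood2 hf]
  | case5 c r hc ih =>
    intro cur out hg hf
    have heqm : markT (c :: r) = (c, false) :: markT r := by rw [markT.eq_def]; simp [hc]
    rw [heqm] at hf
    rw [pvScan_cons_nodbl c r cur out hc, enc2_cons_ne c r hc]
    by_cases hdelim : c = ' ' ∨ c = ','
    · rw [if_pos hdelim]
      have hffr : FFTok (([] : List (Char × Bool)) ++ markT r) := by
        refine FFTok_self_of_append_right (l := cur ++ [(c, false)]) ?_
        simpa [List.append_assoc] using hf
      rw [ih [] (out ++ pvFlush cur) GoodTok_nil hffr]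
      rw [tokensA_prepend (ren1 cur) (enc2 r) c (ren1_no_delim cur hg) hdelim]
      rw [flush_eq' cur hg (FFTok_self_of_append_left (m := (c, false) :: markT r) hf)]
      simp [ren1]
    · rw [if_neg hdelim]
      have hgood2 : GoodTok (cur ++ [(c, false)]) :=
        GoodTok_snoc cur (c, false) hg
          ⟨fun h => by simp at h, fun _ => ⟨fun h => hdelim (Or.inl h), fun h => hdelim (Or.inr h)⟩⟩
      have hff2 : FFTok ((cur ++ [(c, false)]) ++ markT r) := by
        simpa [List.append_assoc] using hf
      rw [ih (cur ++ [(c, false)]) out hgood2 hff2, ren1_append]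
      simp [ren1, f1]

theorem rstrip_prefix (u : List Char) : PySem.Chars.rstrip u <+: u := by
  induction u using List.reverseRecOn with
  | nil => simp [rstrip_nil]
  | append_singleton xs x ih =>
    cases hx : PySem.Chars.isspace x with
    | true => rw [rstrip_snoc x xs hx]; exact ih.trans (List.prefix_append xs [x])
    | false => rw [rstrip_snoc_keep x xs hx]

theorem strip_infix (l : List Char) : PySem.Chars.strip l <:+: l := by
  rw [strip_eq]
  exact (rstrip_prefix _).isInfix.trans (List.dropWhile_suffix _).isInfix

theorem FF_markT (t : List Char) (h1 : ¬ BLs <:+: t) (h2 : ¬ SPs <:+: t) (h3 : ¬ CMs <:+: t) :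
    FFTok (markT t) :=
  ⟨fun hx => h1 (markT_infix t BLs hx),
   fun hx => h2 (markT_infix t SPs hx),
   fun hx => h3 (markT_infix t CMs hx)⟩

theorem tokensA_nil : tokensA [] = [] := rfl

-- ===== VERDICT (by name: the statement is the Claim_ definition above) =====
theorem getlist_space_comma_separated_spec : Claim_unchanged_getlist_space_comma_separated := by
  intro s hdom
  unfold Spec_getlist_space_comma_separated
  intro hnD
  unfold getlist_space_comma_separated getlist_space_comma_separated_alt
  by_cases hempty : s = ""
  · simp [hempty]
  · rw [if_neg hempty, if_neg hempty]
    have hnB : ¬ BLs <:+: PySem.Chars.strip s.toList := by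
      intro h
      exact hnD (Or.inl ((PySem.Chars.isIn_iff_infix _ _).mpr (BL_eq ▸ (h.trans (strip_infix s.toList)))))
    have hnS : ¬ SPs <:+: PySem.Chars.strip s.toList := by
      intro h
      exact hnD (Or.inr (Or.inl ((PySem.Chars.isIn_iff_infix _ _).mpr (SP_eq ▸ (h.trans (strip_infix s.toList))))))
    have hnC : ¬ CMs <:+: PySem.Chars.strip s.toList := by
      intro h
      exact hnD (Or.inr (Or.inr ((PySem.Chars.isIn_iff_infix _ _).mpr (CM_eq ▸ (h.trans (strip_infix s.toList))))))
    have hFF : FFTok (([] : List (Char × Bool)) ++ markT (PySem.Chars.strip s.toList)) := by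
      simpa using FF_markT _ hnB hnS hnC
    rw [scan_main (PySem.Chars.strip s.toList) [] [] GoodTok_nil hFF]
    simp only [List.nil_append, enc_eq, show ren1 [] = [] from rfl]
    by_cases hne : enc2 (PySem.Chars.strip s.toList) = []
    · rw [hne, if_neg (by simp), tokensA_nil]
    · rw [if_pos (by simpa using hne), A_mid]

theorem getlist_space_comma_separated_changed : Claim_changed_getlist_space_comma_separated := by
  unfold Claim_changed_getlist_space_comma_separated; decide
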